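-- pv_equiv track=rewrite | github.com/KnCRJVirX/CPPGolf | cppgolf/golf_rename.py | _group_virt_usrs
-- ===== SOURCE A (Python) =====
-- def _group_virt_usrs(virt_usrs: set, decl_map: dict) -> dict:
--     """按方法名将 virtual USR 分组，返回 {non_rep_usr → rep_usr} 的重映射表。
--
--     libclang 为基类和各派生类的同名虚函数分配不同 USR，若直接重命名会产生不同短名，
--     导致 override 关系断裂。此函数将同名虚函数的所有 USR 合并到同一代表 USR
--     （首次出现的，即 offset 最小的那个），使全链统一映射到同一短名。
--     """
--     by_name: dict = {}  # name → list of (usr, offset)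
--     for usr in virt_usrs:
--         if usr in decl_map:
--             name, off, _ = decl_map[usr]
--             by_name.setdefault(name, []).append((usr, off))
--     remap: dict = {}
--     for name, entries in by_name.items():
--         # offset 最小的作为代表（通常为基类/抽象类中的首次声明）
--         rep_usr = min(entries, key=lambda e: e[1])[0]
--         for usr, _ in entries:
--             if usr != rep_usr:
--                 remap[usr] = rep_usr
--     return remap
-- ===== SOURCE B (Python) =====
-- def _group_virt_usrs(virt_usrs: set, decl_map: dict) -> dict:
--     """Recursive group-extraction: peel off the first name's group, pick its
--     min-offset representative, emit the remappings, recurse on the rest."""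
--     items = [(decl_map[u][0], u, decl_map[u][1]) for u in virt_usrs if u in decl_map]
--     remap = {}
--
--     def peel(pending):
--         if not pending:
--             return
--         name = pending[0][0]
--         group = [(u, o) for (n, u, o) in pending if n == name]
--         others = [t for t in pending if t[0] != name]
--         rep, best = group[0]
--         for u, o in group:
--             if o < best:
--                 rep, best = u, o
--         for u, _ in group:
--             if u != rep:
--                 remap[u] = rep
--         peel(others)
--
--     peel(items)
--     return remap
-- ===== Notes on version B (the rewrite author's own statement) =====
-- stated objective: alternative
-- what changed: Replaces A's dict-of-lists grouping (name -> list of (usr, offset), then min per group over dict items) with a recursive peel: repeatedly extract the first remaining name's whole group by partitioning the flat filtered item list, pick its representative by an explicit running minimum, and recurse on the leftover items; no intermediate grouping dict exists.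
import Mathlib
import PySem

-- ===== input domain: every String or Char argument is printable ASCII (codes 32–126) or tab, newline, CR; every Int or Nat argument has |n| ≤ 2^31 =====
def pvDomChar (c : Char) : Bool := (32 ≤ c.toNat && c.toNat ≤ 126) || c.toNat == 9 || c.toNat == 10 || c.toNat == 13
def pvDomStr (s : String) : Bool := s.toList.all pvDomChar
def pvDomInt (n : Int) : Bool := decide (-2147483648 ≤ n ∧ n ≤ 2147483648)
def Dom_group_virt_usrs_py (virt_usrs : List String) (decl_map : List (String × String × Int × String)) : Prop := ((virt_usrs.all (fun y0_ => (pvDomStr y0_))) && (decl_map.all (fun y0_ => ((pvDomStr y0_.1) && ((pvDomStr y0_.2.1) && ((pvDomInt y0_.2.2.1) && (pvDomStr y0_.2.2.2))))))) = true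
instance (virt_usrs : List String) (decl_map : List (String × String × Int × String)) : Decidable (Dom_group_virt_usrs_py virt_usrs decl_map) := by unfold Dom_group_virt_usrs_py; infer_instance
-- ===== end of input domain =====

-- B replaces A's dict-of-lists grouping with a recursive peel over a flat filtered item
-- list: extract the first name's whole group, pick its representative by a running
-- minimum, recurse on the leftovers (alternative decomposition, similar cost).


-- ===== PORT A =====
-- dict lookup `decl_map[usr]` / `usr in decl_map`: first match in the association list
def pvLookA (decl_map : List (String × String × Int × String)) (usr : String) : Option (String × Int × String) :=
  (decl_map.find? (fun p => p.1 == usr)).map (fun p => p.2)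

def group_virt_usrs_py (virt_usrs : List String) (decl_map : List (String × String × Int × String)) : List (String × String) :=
  let by_name : PySem.Dict String (List (String × Int)) :=
    virt_usrs.foldl (fun d usr =>
      match pvLookA decl_map usr with
      | some (name, off, _) => d.modify name [] (fun l => l ++ [(usr, off)])
      | none => d) PySem.Dict.empty
  let remap : PySem.Dict String String :=
    by_name.items.foldl (fun r p =>
      match PySem.List.min? p.2 (fun e => e.2) with
      | some rep =>   -- rep_usr = min(entries, key=λe: e[1])[0]
        p.2.foldl (fun r e => if e.1 ≠ rep.1 then r.insert e.1 rep.1 else r) r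
      | none => r)    -- unreachable: every group is nonempty
      PySem.Dict.empty
  remap.items

-- ===== PORT B =====
def pvLookB (decl_map : List (String × String × Int × String)) (usr : String) : Option (String × Int × String) :=
  (decl_map.find? (fun p => p.1 == usr)).map (fun p => p.2)

-- the recursive `peel`: remap is the accumulator (Python mutates a closure variable)
def pvPeel (remap : PySem.Dict String String) : List (String × String × Int) → PySem.Dict String String
  | [] => remap
  | p :: pending =>
    let name := p.1
    let group := ((p :: pending).filter (fun t => t.1 == name)).map (fun t => t.2)
    let others := (p :: pending).filter (fun t => !(t.1 == name))
    match group with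
    | [] => remap   -- unreachable: the head belongs to `group`
    | g0 :: gt =>
      let rep := (g0 :: gt).foldl (fun rb e => if e.2 < rb.2 then e else rb) g0
      let remap' := (g0 :: gt).foldl (fun r e => if e.1 ≠ rep.1 then r.insert e.1 rep.1 else r) remap
      pvPeel remap' others
  termination_by l => l.length
  decreasing_by
    simp only [List.filter_cons, beq_self_eq_true, Bool.not_true, if_neg, Bool.false_eq_true,
      not_false_eq_true]
    exact Nat.lt_succ_of_le (List.length_filter_le _ _)

def group_virt_usrs_py_alt (virt_usrs : List String) (decl_map : List (String × String × Int × String)) : List (String × String) :=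
  let items : List (String × String × Int) :=
    virt_usrs.filterMap (fun u =>
      match pvLookB decl_map u with
      | some (name, off, _) => some (name, u, off)
      | none => none)
  (pvPeel PySem.Dict.empty items).items

-- ===== PRECONDITION & SPEC =====
def Spec_group_virt_usrs_py (virt_usrs : List String) (decl_map : List (String × String × Int × String)) (out : List (String × String)) : Prop := out = group_virt_usrs_py_alt virt_usrs decl_map
instance (virt_usrs : List String) (decl_map : List (String × String × Int × String)) (out : List (String × String)) : Decidable (Spec_group_virt_usrs_py virt_usrs decl_map out) := by unfold Spec_group_virt_usrs_py; infer_instance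

-- ===== CLAIM (what is proved, stated in full; the proofs are below) =====
def Claim_equal_group_virt_usrs_py : Prop := ∀ (virt_usrs : List String) (decl_map : List (String × String × Int × String)), Dom_group_virt_usrs_py virt_usrs decl_map → Spec_group_virt_usrs_py virt_usrs decl_map (group_virt_usrs_py virt_usrs decl_map)

-- ===== LEMMAS AND PROOFS =====

-- the common filtered item list (name, usr, off), proof-only abstraction
def pvL (virt_usrs : List String) (decl_map : List (String × String × Int × String)) : List (String × String × Int) :=
  virt_usrs.filterMap (fun usr =>
    match pvLookA decl_map usr with
    | some (name, off, _) => some (name, usr, off)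
    | none => none)

-- processing of one name's group, read off the flat list L (proof-only abstraction)
def pvProcG (L : List (String × String × Int)) (r : PySem.Dict String String) (name : String) : PySem.Dict String String :=
  match (L.filter (fun t => t.1 == name)).map (fun t => t.2) with
  | [] => r
  | g0 :: gt =>
    let rep := gt.foldl (fun rb e => if e.2 < rb.2 then e else rb) g0
    (g0 :: gt).foldl (fun r e => if e.1 ≠ rep.1 then r.insert e.1 rep.1 else r) r

theorem pvL_byname (virt_usrs : List String) (decl_map : List (String × String × Int × String))
    (d : PySem.Dict String (List (String × Int))) :
    virt_usrs.foldl (fun d usr =>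
      match pvLookA decl_map usr with
      | some (name, off, _) => d.modify name [] (fun l => l ++ [(usr, off)])
      | none => d) d
    = (pvL virt_usrs decl_map).foldl (fun d p => d.modify p.1 [] (fun l => l ++ [p.2])) d := by
  induction virt_usrs generalizing d with
  | nil => rfl
  | cons u t ih =>
    simp only [pvL, List.filterMap_cons, List.foldl_cons]
    cases h : pvLookA decl_map u with
    | none => simpa [pvL, h] using ih d
    | some v =>
      obtain ⟨name, off, z⟩ := v
      simpa [pvL, h] using ih (d.modify name [] (fun l => l ++ [(u, off)]))

theorem pvMin_scan (g0 : String × Int) (gt : List (String × Int)) :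
    PySem.List.min? (g0 :: gt) (fun e => e.2)
    = some (gt.foldl (fun rep e => if e.2 < rep.2 then e else rep) g0) := by
  simp only [PySem.List.min?, List.foldl_cons]
  induction gt generalizing g0 with
  | nil => rfl
  | cons e t ih =>
    simp only [List.foldl_cons]
    by_cases h : e.2 < g0.2 <;> simp [h, ih]

-- A equals the name-indexed fold of pvProcG over the deduplicated name list
theorem pvA_eq_fold (virt_usrs : List String) (decl_map : List (String × String × Int × String)) :
    group_virt_usrs_py virt_usrs decl_map
    = ((PySem.Set.update ([] : List String) ((pvL virt_usrs decl_map).map (fun p => p.1))).foldl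
        (pvProcG (pvL virt_usrs decl_map)) PySem.Dict.empty).items := by
  simp only [group_virt_usrs_py]
  rw [pvL_byname]
  set L := pvL virt_usrs decl_map with hL
  set D := L.foldl (fun d p => d.modify p.1 [] (fun l => l ++ [p.2])) PySem.Dict.empty with hD
  have hnodup : D.keys.Nodup := by
    rw [hD]
    exact PySem.Dict.nodup_keys_foldl_modify_key L (fun p => p.1) [] (fun _ p l => l ++ [p.2])
      PySem.Dict.empty (by simp)
  have hkeys : D.keys = PySem.Set.update ([] : List String) (L.map (fun p => p.1)) := by
    rw [hD]
    have := PySem.Dict.keys_foldl_modify_key L (fun p => p.1) ([] : List (String × Int))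
      (fun _ p l => l ++ [p.2]) PySem.Dict.empty
    simpa [PySem.Dict.keys_empty] using this
  have hget : ∀ k, D.getD k [] = (L.filter (fun p => p.1 == k)).map (fun p => p.2) := by
    intro k
    rw [hD]
    have := PySem.Dict.getD_foldl_modify_append (l := L.map (fun p => (p.1, p.2)))
      (d := PySem.Dict.empty) (c := k)
    simp only [List.foldl_map] at this
    simpa [PySem.Dict.getD_empty, List.filter_map, Function.comp] using this
  rw [PySem.Dict.items_eq_map_keys D hnodup [], hkeys, List.foldl_map]
  apply congrArg
  refine PySem.List.foldl_congr_mem _ _ _ _ (fun r name _ => ?_)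
  simp only [hget name, pvProcG]
  cases hg : (L.filter (fun p => p.1 == name)).map (fun p => p.2) with
  | nil => simp [PySem.List.min?]
  | cons g0 gt => simp [pvMin_scan]

-- Set.update ignores elements already present
theorem pvUpdate_filter (x : String) (xs : List String) (acc : List String) (hx : x ∈ acc) :
    PySem.Set.update acc xs = PySem.Set.update acc (xs.filter (fun y => !(y == x))) := by
  induction xs generalizing acc with
  | nil => rfl
  | cons y t ih =>
    by_cases h : y = x
    · have hadd : PySem.Set.add acc y = acc := by subst h; simp [PySem.Set.add, hx]
      have hfilter : (y :: t).filter (fun z => !(z == x)) = t.filter (fun z => !(z == x)) := by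
        simp [h]
      rw [hfilter]
      calc PySem.Set.update acc (y :: t) = PySem.Set.update (PySem.Set.add acc y) t := rfl
        _ = PySem.Set.update acc t := by rw [hadd]
        _ = PySem.Set.update acc (t.filter (fun z => !(z == x))) := ih acc hx
    · have hfilter : (y :: t).filter (fun z => !(z == x)) = y :: t.filter (fun z => !(z == x)) := by
        simp [h]
      rw [hfilter]
      have hx' : x ∈ PySem.Set.add acc y := (PySem.Set.mem_add _ _ _).2 (Or.inl hx)
      calc PySem.Set.update acc (y :: t) = PySem.Set.update (PySem.Set.add acc y) t := rfl
        _ = PySem.Set.update (PySem.Set.add acc y) (t.filter (fun z => !(z == x))) := ih _ hx'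
        _ = PySem.Set.update acc (y :: t.filter (fun z => !(z == x))) := rfl

-- a head element absent from the tail list stays in front through Set.update
theorem pvUpdate_cons_fresh (x : String) (xs : List String) (s : List String)
    (h : ∀ y ∈ xs, y ≠ x) :
    PySem.Set.update (x :: s) xs = x :: PySem.Set.update s xs := by
  induction xs generalizing s with
  | nil => rfl
  | cons y t ih =>
    have hy : y ≠ x := h y (by simp)
    have hadd : PySem.Set.add (x :: s) y = x :: PySem.Set.add s y := by
      by_cases hm : y ∈ s
      · simp [PySem.Set.add, hm, hy]
      · have hmx : y ∉ x :: s := by simp [hm, hy]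
        simp [PySem.Set.add, hm, hmx]
    calc PySem.Set.update (x :: s) (y :: t) = PySem.Set.update (PySem.Set.add (x :: s) y) t := rfl
      _ = PySem.Set.update (x :: PySem.Set.add s y) t := by rw [hadd]
      _ = x :: PySem.Set.update (PySem.Set.add s y) t := ih _ (fun z hz => h z (by simp [hz]))
      _ = x :: PySem.Set.update s (y :: t) := rfl

theorem pvMem_update_nil (xs : List String) (y : String)
    (hy : y ∈ PySem.Set.update ([] : List String) xs) : y ∈ xs := by
  have h0 : PySem.Set.update ([] : List String) xs = PySem.Set.ofList xs := rfl
  rw [h0] at hy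
  exact (PySem.Set.mem_ofList _ _).1 hy

-- B's peel equals the same name-indexed fold
theorem pvPeel_eq_fold_aux : ∀ (n : Nat) (L : List (String × String × Int)), L.length ≤ n →
    ∀ (r : PySem.Dict String String),
    pvPeel r L
    = (PySem.Set.update ([] : List String) (L.map (fun p => p.1))).foldl (pvProcG L) r := by
  intro n
  induction n with
  | zero =>
    intro L hL r
    have : L = [] := List.eq_nil_of_length_eq_zero (Nat.le_zero.1 hL)
    subst this; simp [pvPeel, PySem.Set.update]
  | succ n ih =>
    intro L hL r
    cases L with
    | nil => simp [pvPeel, PySem.Set.update]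
    | cons p pending =>
      rw [pvPeel]
      have hfg : ((p :: pending).filter (fun t => t.1 == p.1))
          = p :: pending.filter (fun t => t.1 == p.1) := by
        simp
      have hfo : ((p :: pending).filter (fun t => !(t.1 == p.1)))
          = pending.filter (fun t => !(t.1 == p.1)) := by
        simp
      simp only [hfg, hfo, List.map_cons]
      set g0 := p.2 with hg0
      set gt := (pending.filter (fun t => t.1 == p.1)).map (fun t => t.2) with hgt
      set others := pending.filter (fun t => !(t.1 == p.1)) with hothers
      set rep := (g0 :: gt).foldl (fun rb e => if e.2 < rb.2 then e else rb) g0 with hrep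
      set remap' := (g0 :: gt).foldl
        (fun r e => if e.1 ≠ rep.1 then r.insert e.1 rep.1 else r) r with hremap
      -- left side: recursive call, handled by the induction hypothesis
      have hlen : others.length ≤ n := by
        have h1 : others.length ≤ pending.length := List.length_filter_le _ _
        have h2 : pending.length ≤ n := Nat.le_of_succ_le_succ hL
        exact Nat.le_trans h1 h2
      rw [ih others hlen remap']
      -- right side: peel the name p.1 off the deduplicated name list
      have hmap : (pending.map (fun q => q.1)).filter (fun y => !(y == p.1))
          = others.map (fun q => q.1) := by
        rw [hothers, List.filter_map]; rfl
      have hnames : PySem.Set.update ([] : List String) (p.1 :: pending.map (fun q => q.1))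
          = p.1 :: PySem.Set.update ([] : List String) (others.map (fun q => q.1)) := by
        have e1 : PySem.Set.update ([] : List String) (p.1 :: pending.map (fun q => q.1))
            = PySem.Set.update [p.1] (pending.map (fun q => q.1)) := by
          simp [PySem.Set.update, PySem.Set.add]
        rw [e1, pvUpdate_filter p.1 _ [p.1] (by simp), hmap]
        refine pvUpdate_cons_fresh p.1 _ [] ?_
        intro y hy
        obtain ⟨q, hq, rfl⟩ := List.mem_map.1 hy
        have := (List.mem_filter.1 (hothers ▸ hq)).2
        simpa using this
      rw [hnames, List.foldl_cons]
      -- the first step of the fold is exactly remap'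
      have hstep : pvProcG (p :: pending) r p.1 = remap' := by
        have hrep' : rep = gt.foldl (fun rb e => if e.2 < rb.2 then e else rb) g0 := by
          rw [hrep]; simp
        simp only [pvProcG, hfg, List.map_cons, ← hg0, ← hgt, ← hrep', hremap]
      rw [hstep]
      -- remaining names never mention p.1, so the groups agree on the smaller list
      refine PySem.List.foldl_congr_mem _ _ _ _ (fun acc x hx => ?_)
      have hxmem : x ∈ (pending.map (fun q => q.1)).filter (fun y => !(y == p.1)) := by
        rw [hmap]; exact pvMem_update_nil _ _ hx
      have hxne : x ≠ p.1 := by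
        have := (List.mem_filter.1 hxmem).2; simpa using this
      have hgroup : (p :: pending).filter (fun t => t.1 == x)
          = others.filter (fun t => t.1 == x) := by
        rw [hothers, List.filter_filter]
        have hhead : ((p.1 == x) = false) := by
          simp [Ne.symm hxne]
        rw [List.filter_cons]
        simp only [hhead, Bool.false_eq_true, if_false]
        refine List.filter_congr ?_
        intro t ht
        by_cases hc : t.1 = x
        · subst hc
          have : (t.1 == p.1) = false := by simpa using hxne
          simp [this]
        · simp [hc]
      simp only [pvProcG, hgroup]

theorem pvPeel_eq_fold (L : List (String × String × Int)) (r : PySem.Dict String String) :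
    pvPeel r L
    = (PySem.Set.update ([] : List String) (L.map (fun p => p.1))).foldl (pvProcG L) r :=
  pvPeel_eq_fold_aux L.length L (Nat.le_refl _) r

theorem group_virt_usrs_py_eq (virt_usrs : List String) (decl_map : List (String × String × Int × String)) :
    group_virt_usrs_py virt_usrs decl_map = group_virt_usrs_py_alt virt_usrs decl_map := by
  have hLB : group_virt_usrs_py_alt virt_usrs decl_map
      = (pvPeel PySem.Dict.empty (pvL virt_usrs decl_map)).items := rfl
  rw [pvA_eq_fold, hLB, pvPeel_eq_fold]

-- ===== VERDICT (by name: the statement is the Claim_ definition above) =====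
theorem group_virt_usrs_py_spec : Claim_equal_group_virt_usrs_py := by
  intro virt_usrs decl_map _
  unfold Spec_group_virt_usrs_py
  exact group_virt_usrs_py_eq virt_usrs decl_map
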